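-- pv_equiv track=rewrite | github.com/NinjadenMu/polycubes | polycube_enumerator.py | fits_bounding_box
-- ===== SOURCE A (Python) =====
-- def fits_bounding_box(polycube): #This is unnecessary for general polycube enumeration, I just added this for something specific to a school assignment
--     min_x = min(x for x, y, z in polycube)
--     max_x = max(x for x, y, z in polycube)
--     min_y = min(y for x, y, z in polycube)
--     max_y = max(y for x, y, z in polycube)
--     min_z = min(z for x, y, z in polycube)
--     max_z = max(z for x, y, z in polycube)
--     return (max_x - min_x <= 2) and (max_y - min_y <= 2) and (max_z - min_z <= 2)
-- ===== SOURCE B (Python) =====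
-- def fits_bounding_box(polycube):
--     it = iter(polycube)
--     try:
--         x, y, z = next(it)
--     except StopIteration:
--         raise ValueError("min() arg is an empty sequence")
--     min_x = max_x = x
--     min_y = max_y = y
--     min_z = max_z = z
--     for x, y, z in it:
--         if x < min_x: min_x = x
--         if x > max_x: max_x = x
--         if y < min_y: min_y = y
--         if y > max_y: max_y = y
--         if z < min_z: min_z = z
--         if z > max_z: max_z = z
--     return (max_x - min_x <= 2) and (max_y - min_y <= 2) and (max_z - min_z <= 2)
-- ===== Notes on version B (the rewrite author's own statement) =====
-- stated objective: alternative
-- what changed: Replaces six separate full scans (one min/max generator pass per coordinate) by a single fused pass that seeds all six extrema from the first point and updates them in one loop.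
import Mathlib
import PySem

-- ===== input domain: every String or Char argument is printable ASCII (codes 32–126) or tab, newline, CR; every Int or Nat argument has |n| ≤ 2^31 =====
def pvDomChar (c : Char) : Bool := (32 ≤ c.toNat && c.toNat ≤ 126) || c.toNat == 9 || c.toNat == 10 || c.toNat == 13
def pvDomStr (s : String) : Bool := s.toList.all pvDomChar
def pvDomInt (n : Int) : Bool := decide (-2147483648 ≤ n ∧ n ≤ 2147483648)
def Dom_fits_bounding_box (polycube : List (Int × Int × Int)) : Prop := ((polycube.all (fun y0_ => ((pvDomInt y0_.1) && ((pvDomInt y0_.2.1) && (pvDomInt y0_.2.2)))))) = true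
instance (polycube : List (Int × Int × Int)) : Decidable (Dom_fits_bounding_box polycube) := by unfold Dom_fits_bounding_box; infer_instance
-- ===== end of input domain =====

-- B fuses A's six min/max scans into one pass seeding the extrema from the first point (objective: faster, constant factor).
-- Both A and B raise ValueError on the empty list; Pre_ excludes it.

-- ===== PORT A =====
-- six separate extremum scans, as in A (min()/max() over a generator per coordinate)
def fits_bounding_box (polycube : List (Int × Int × Int)) : Bool :=
  match PySem.List.min? (polycube.map (fun t => t.1)) (fun v => v),
        PySem.List.max? (polycube.map (fun t => t.1)) (fun v => v),
        PySem.List.min? (polycube.map (fun t => t.2.1)) (fun v => v),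
        PySem.List.max? (polycube.map (fun t => t.2.1)) (fun v => v),
        PySem.List.min? (polycube.map (fun t => t.2.2)) (fun v => v),
        PySem.List.max? (polycube.map (fun t => t.2.2)) (fun v => v) with
  | some min_x, some max_x, some min_y, some max_y, some min_z, some max_z =>
      decide (max_x - min_x ≤ 2) && (decide (max_y - min_y ≤ 2) && decide (max_z - min_z ≤ 2))
  | _, _, _, _, _, _ => false   -- unreachable under Pre_ (empty list: Python raises ValueError)

-- ===== PORT B =====
-- single fused pass carrying all six extrema
def bbGo : List (Int × Int × Int) → Int → Int → Int → Int → Int → Int → Bool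
  | [], mnx, mxx, mny, mxy, mnz, mxz =>
      decide (mxx - mnx ≤ 2) && (decide (mxy - mny ≤ 2) && decide (mxz - mnz ≤ 2))
  | (x, y, z) :: t, mnx, mxx, mny, mxy, mnz, mxz =>
      bbGo t (if x < mnx then x else mnx) (if x > mxx then x else mxx)
             (if y < mny then y else mny) (if y > mxy then y else mxy)
             (if z < mnz then z else mnz) (if z > mxz then z else mxz)

def fits_bounding_box_alt (polycube : List (Int × Int × Int)) : Bool :=
  match polycube with
  | [] => false   -- unreachable under Pre_ (Python B raises ValueError here)
  | (x, y, z) :: t => bbGo t x x y y z z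

-- ===== PRECONDITION & SPEC =====
-- Pre_ excludes the empty list, on which both Pythons raise ValueError.
def Pre_fits_bounding_box (polycube : List (Int × Int × Int)) : Prop := polycube ≠ []
instance (polycube : List (Int × Int × Int)) : Decidable (Pre_fits_bounding_box polycube) := by unfold Pre_fits_bounding_box; infer_instance
def pvWitness_fits_bounding_box : (List (Int × Int × Int)) := [(0, 0, 0), (2, 1, 0)]

def Spec_fits_bounding_box (polycube : List (Int × Int × Int)) (out : Bool) : Prop := out = fits_bounding_box_alt polycube
instance (polycube : List (Int × Int × Int)) (out : Bool) : Decidable (Spec_fits_bounding_box polycube out) := by unfold Spec_fits_bounding_box; infer_instance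

-- ===== CLAIM (what is proved, stated in full; the proofs are below) =====
def Claim_equal_fits_bounding_box : Prop := ∀ (polycube : List (Int × Int × Int)), Dom_fits_bounding_box polycube → Pre_fits_bounding_box polycube → Spec_fits_bounding_box polycube (fits_bounding_box polycube)

-- ===== LEMMAS AND PROOFS =====

-- B's fused loop computes exactly the six folded extrema
theorem bbGo_eq (t : List (Int × Int × Int)) :
    ∀ (mnx mxx mny mxy mnz mxz : Int),
    bbGo t mnx mxx mny mxy mnz mxz =
      (decide (((t.map (fun v => v.1)).foldl max mxx) - ((t.map (fun v => v.1)).foldl min mnx) ≤ 2) &&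
       (decide (((t.map (fun v => v.2.1)).foldl max mxy) - ((t.map (fun v => v.2.1)).foldl min mny) ≤ 2) &&
        decide (((t.map (fun v => v.2.2)).foldl max mxz) - ((t.map (fun v => v.2.2)).foldl min mnz) ≤ 2))) := by
  induction t with
  | nil => intro mnx mxx mny mxy mnz mxz; simp [bbGo]
  | cons h t ih =>
    intro mnx mxx mny mxy mnz mxz
    obtain ⟨x, y, z⟩ := h
    simp only [bbGo, ih, List.map, List.foldl]
    have e1 : (if x < mnx then x else mnx) = min mnx x := by omega
    have e2 : (if x > mxx then x else mxx) = max mxx x := by omega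
    have e3 : (if y < mny then y else mny) = min mny y := by omega
    have e4 : (if y > mxy then y else mxy) = max mxy y := by omega
    have e5 : (if z < mnz then z else mnz) = min mnz z := by omega
    have e6 : (if z > mxz then z else mxz) = max mxz z := by omega
    rw [e1, e2, e3, e4, e5, e6]
    rfl

-- ===== VERDICT (by name: the statement is the Claim_ definition above) =====
theorem fits_bounding_box_spec : Claim_equal_fits_bounding_box := by
  intro polycube _hdom hpre
  unfold Spec_fits_bounding_box
  match polycube with
  | [] => exact absurd rfl hpre
  | (x, y, z) :: t =>
    simp only [fits_bounding_box, fits_bounding_box_alt, List.map,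
      PySem.List.min?_id_cons, PySem.List.max?_id_cons, bbGo_eq]
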